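-- pv_equiv track=rewrite | github.com/R-Schafer/learning | lists/l16.py | checking_order
-- ===== SOURCE A (Python) =====
-- def checking_order(values):
--     for i in range(0, len(values) - 1):
--         if i % 2 == 0:
--             if values[i] >= values[i + 1]:
--                 return False
--
--         elif i % 2 == 1:
--             if values[i] <= values[i + 1]:
--                 return False
--     return True
-- ===== SOURCE B (Python) =====
-- def checking_order(values):
--     pairs = list(zip(values, values[1:]))
--     return all(a < b for a, b in pairs[0::2]) and all(a > b for a, b in pairs[1::2])
-- ===== Notes on version B (the rewrite author's own statement) =====
-- stated objective: alternative
-- what changed: B replaces A's single indexed loop with early returns by materializing the adjacent pairs (zip) and returning the conjunction of two strided-slice passes: even-position pairs must strictly increase, odd-position pairs strictly decrease.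
import Mathlib
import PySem

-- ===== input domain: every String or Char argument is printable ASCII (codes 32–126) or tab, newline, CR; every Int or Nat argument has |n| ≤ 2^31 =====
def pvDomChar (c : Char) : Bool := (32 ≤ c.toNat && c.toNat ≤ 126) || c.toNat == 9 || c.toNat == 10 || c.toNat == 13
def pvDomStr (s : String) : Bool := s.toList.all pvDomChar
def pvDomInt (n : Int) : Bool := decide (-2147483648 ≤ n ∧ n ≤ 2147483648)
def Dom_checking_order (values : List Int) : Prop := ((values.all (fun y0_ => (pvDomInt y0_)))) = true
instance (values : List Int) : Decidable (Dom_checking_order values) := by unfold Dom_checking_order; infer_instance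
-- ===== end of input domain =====

-- B re-implements the zigzag check as two strided passes over the zipped adjacent pairs (alternative decomposition, same cost).

-- ===== PORT A =====
-- the loop body of A: iterates over the remaining indices, early return = stop with false
def pvCoLoop (values : List Int) : List Int → Bool
  | [] => true
  | i :: rest =>
    if i % 2 == 0 then
      if PySem.List.pyGetD values i 0 ≥ PySem.List.pyGetD values (i + 1) 0 then false
      else pvCoLoop values rest
    else if i % 2 == 1 then
      if PySem.List.pyGetD values i 0 ≤ PySem.List.pyGetD values (i + 1) 0 then false
      else pvCoLoop values rest
    else pvCoLoop values rest

def checking_order (values : List Int) : Bool :=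
  pvCoLoop values (PySem.List.pyRange 0 ((values.length : Int) - 1) 1)

-- ===== PORT B =====
-- pairs = list(zip(values, values[1:])); then pairs[0::2] must strictly increase and
-- pairs[1::2] strictly decrease.  slice? with the literal step 2 never fails; .getD [] totalizes.
def checking_order_alt (values : List Int) : Bool :=
  let pairs := values.zip (PySem.List.slice values (some 1) none)
  ((PySem.List.slice? pairs (some 0) none 2).getD []).all (fun p => decide (p.1 < p.2)) &&
  ((PySem.List.slice? pairs (some 1) none 2).getD []).all (fun p => decide (p.1 > p.2))

-- ===== PRECONDITION & SPEC =====
def Spec_checking_order (values : List Int) (out : Bool) : Prop := out = checking_order_alt values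
instance (values : List Int) (out : Bool) : Decidable (Spec_checking_order values out) := by unfold Spec_checking_order; infer_instance

-- ===== CLAIM (what is proved, stated in full; the proofs are below) =====
def Claim_equal_checking_order : Prop := ∀ (values : List Int), Dom_checking_order values → Spec_checking_order values (checking_order values)

-- ===== LEMMAS AND PROOFS =====

-- every other element of a list: l[0::2]
def pvEveryOther {α : Type} : List α → List α
  | [] => []
  | x :: r => x :: pvEveryOther (r.drop 1)
  termination_by l => l.length
  decreasing_by simp only [List.length_drop, List.length_cons]; omega

@[simp] theorem pvEveryOther_nil {α : Type} : pvEveryOther ([] : List α) = [] := by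
  rw [pvEveryOther.eq_def]

@[simp] theorem pvEveryOther_cons {α : Type} (x : α) (r : List α) :
    pvEveryOther (x :: r) = x :: pvEveryOther (r.drop 1) := by
  simp [pvEveryOther]

theorem pvEveryOther_eq_filterMap {α : Type} : ∀ zs : List α,
    pvEveryOther zs = List.filterMap (fun k => zs[2 * k]?) (List.range ((zs.length + 1) / 2))
  | [] => by simp [pvEveryOther]
  | x :: t => by
    have ih := pvEveryOther_eq_filterMap (t.drop 1)
    have hcnt : ((x :: t).length + 1) / 2 = ((t.drop 1).length + 1) / 2 + 1 := by
      simp; omega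
    rw [pvEveryOther_cons, ih, hcnt, List.range_succ_eq_map]
    simp [List.filterMap_map]
    apply List.filterMap_congr
    intro k _
    have h2 : 2 * (k + 1) = 2 * k + 1 + 1 := by omega
    rw [h2, List.getElem?_cons_succ]
  termination_by zs => zs.length
  decreasing_by simp only [List.length_drop, List.length_cons]; omega

-- the step-2 slice from a nonnegative start is pvEveryOther of the dropped list
theorem pvSlice_two {α : Type} (xs : List α) (a : Nat) :
    PySem.List.slice? xs (some (a : Int)) none 2 = some (pvEveryOther (xs.drop a)) := by
  by_cases hle : a ≤ xs.length
  · rw [pvEveryOther_eq_filterMap]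
    simp only [PySem.List.slice?, PySem.List.sliceIndices]
    norm_num
    have hmin : min (a : Int) (xs.length : Int) = (a : Int) := by omega
    rw [hmin]
    have h0 : ¬ ((a : Int) < 0) := by omega
    simp only [if_neg h0]
    have hlen : (xs.drop a).length = xs.length - a := by simp
    have hcnt : (if (a : Int) < (xs.length : Int) then (((xs.length : Int) - a + 2 - 1) / 2).toNat else 0)
        = ((xs.drop a).length + 1) / 2 := by
      rw [hlen]; split_ifs with h <;> omega
    rw [hcnt]
    simp only [hlen]
    apply List.filterMap_congr
    intro k _
    congr 1
  · have hdrop : xs.drop a = [] := by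
      apply List.drop_eq_nil_of_le; omega
    simp only [PySem.List.slice?, PySem.List.sliceIndices]
    have h0 : ¬ ((a : Int) < 0) := by omega
    have hmin : min (a : Int) (xs.length : Int) = (xs.length : Int) := by omega
    simp [hdrop, h0, hmin]

-- the adjacent pairs of a list
def pvPairs (vs : List Int) : List (Int × Int) := vs.zip vs.tail

-- the two halves of B, as functions of the remaining suffix
def pvF (vs : List Int) : Bool :=
  (pvEveryOther (pvPairs vs)).all (fun p => decide (p.1 < p.2)) &&
  (pvEveryOther ((pvPairs vs).drop 1)).all (fun p => decide (p.1 > p.2))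
def pvG (vs : List Int) : Bool :=
  (pvEveryOther (pvPairs vs)).all (fun p => decide (p.1 > p.2)) &&
  (pvEveryOther ((pvPairs vs).drop 1)).all (fun p => decide (p.1 < p.2))

theorem pvPairs_cons2 (a b : Int) (r : List Int) :
    pvPairs (a :: b :: r) = (a, b) :: pvPairs (b :: r) := by
  simp [pvPairs]

theorem pvF_cons2 (a b : Int) (r : List Int) :
    pvF (a :: b :: r) = (decide (a < b) && pvG (b :: r)) := by
  rw [pvF, pvG, pvPairs_cons2, pvEveryOther_cons]
  simp only [List.drop_one, List.tail_cons, List.all_cons]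
  cases decide (a < b) <;>
    cases (pvEveryOther ((pvPairs (b :: r)).drop 1)).all (fun p => decide (p.1 > p.2)) <;>
    cases (pvEveryOther (pvPairs (b :: r))).all (fun p => decide (p.1 > p.2)) <;> simp_all

theorem pvG_cons2 (a b : Int) (r : List Int) :
    pvG (a :: b :: r) = (decide (a > b) && pvF (b :: r)) := by
  rw [pvG, pvF, pvPairs_cons2, pvEveryOther_cons]
  simp only [List.drop_one, List.tail_cons, List.all_cons]
  cases decide (a > b) <;>
    cases (pvEveryOther ((pvPairs (b :: r)).drop 1)).all (fun p => decide (p.1 < p.2)) <;>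
    cases (pvEveryOther (pvPairs (b :: r))).all (fun p => decide (p.1 < p.2)) <;> simp_all

theorem pvF_short (vs : List Int) (h : vs.length ≤ 1) : pvF vs = true := by
  match vs, h with
  | [], _ => simp [pvF, pvPairs]
  | [a], _ => simp [pvF, pvPairs]

theorem pvG_short (vs : List Int) (h : vs.length ≤ 1) : pvG vs = true := by
  match vs, h with
  | [], _ => simp [pvG, pvPairs]
  | [a], _ => simp [pvG, pvPairs]

-- A's loop over the remaining indices computes pvF/pvG of the corresponding suffix
theorem pvCoLoop_eq (vs : List Int) : ∀ (n k : Nat), vs.length ≤ k + n →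
    pvCoLoop vs (PySem.List.pyRange (k : Int) ((vs.length : Int) - 1) 1) =
      (if k % 2 = 0 then pvF (vs.drop k) else pvG (vs.drop k)) := by
  intro n
  induction n with
  | zero =>
    intro k hk
    rw [PySem.List.pyRange_one_eq_nil (by omega)]
    have : vs.drop k = [] := List.drop_eq_nil_of_le (by omega)
    rw [this, pvCoLoop]
    split <;> simp [pvF, pvG, pvPairs]
  | succ n ih =>
    intro k hk
    by_cases hend : vs.length ≤ k + 1
    · rw [PySem.List.pyRange_one_eq_nil (by omega), pvCoLoop]
      have hlen : (vs.drop k).length ≤ 1 := by simp; omega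
      split
      · exact (pvF_short _ hlen).symm
      · exact (pvG_short _ hlen).symm
    · have hk1 : k + 1 < vs.length := by omega
      have hkl : k < vs.length := by omega
      rw [PySem.List.pyRange_one_cons (by omega), pvCoLoop]
      have hget : PySem.List.pyGetD vs (k : Int) 0 = vs[k] := by
        rw [PySem.List.pyGetD_natCast]; exact List.getD_eq_getElem _ _ hkl
      have hget1 : PySem.List.pyGetD vs ((k : Int) + 1) 0 = vs[k + 1] := by
        have : (k : Int) + 1 = ((k + 1 : Nat) : Int) := by push_cast; ring
        rw [this, PySem.List.pyGetD_natCast]; exact List.getD_eq_getElem _ _ hk1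
      have hrest : (k : Int) + 1 = ((k + 1 : Nat) : Int) := by push_cast; ring
      have hdrop : vs.drop k = vs[k] :: vs[k + 1] :: vs.drop (k + 2) := by
        rw [List.drop_eq_getElem_cons hkl, List.drop_eq_getElem_cons hk1]
      have hdrop1 : vs.drop (k + 1) = vs[k + 1] :: vs.drop (k + 2) :=
        List.drop_eq_getElem_cons hk1
      have ihk := ih (k + 1) (by omega)
      have hcast : (k : Int) + 1 = ((k + 1 : Nat) : Int) := by push_cast; ring
      rw [hcast] at hget1
      by_cases hpar : k % 2 = 0
      · have hm : ((k : Int) % 2 == 0) = true := by simp; omega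
        have hpar1 : ¬ (k + 1) % 2 = 0 := by omega
        rw [if_neg hpar1] at ihk
        rw [hcast, if_pos (by rw [hm]), hget, hget1, if_pos hpar, hdrop, pvF_cons2, ← hdrop1]
        by_cases hge : vs[k] ≥ vs[k + 1]
        · rw [if_pos hge]
          have : ¬ vs[k] < vs[k + 1] := by omega
          simp [this]
        · rw [if_neg hge, ihk]
          have : vs[k] < vs[k + 1] := by omega
          simp [this]
      · have hm : ((k : Int) % 2 == 0) = false := by simp; omega
        have hm1 : ((k : Int) % 2 == 1) = true := by simp; omega
        have hpar1 : (k + 1) % 2 = 0 := by omega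
        rw [if_pos hpar1] at ihk
        rw [hcast, if_neg (by rw [hm]; simp), if_pos (by rw [hm1]), hget, hget1, if_neg hpar, hdrop,
          pvG_cons2, ← hdrop1]
        by_cases hle : vs[k] ≤ vs[k + 1]
        · rw [if_pos hle]
          have : ¬ vs[k] > vs[k + 1] := by omega
          simp [this]
        · rw [if_neg hle, ihk]
          have : vs[k] > vs[k + 1] := by omega
          simp [this]

theorem pvA_eq_F (vs : List Int) : checking_order vs = pvF vs := by
  have h := pvCoLoop_eq vs vs.length 0 (by omega)
  simpa [checking_order] using h

theorem pvSlice_two0 {α : Type} (xs : List α) :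
    PySem.List.slice? xs (some 0) none 2 = some (pvEveryOther xs) := by
  simpa using pvSlice_two xs 0

theorem pvSlice_two1 {α : Type} (xs : List α) :
    PySem.List.slice? xs (some 1) none 2 = some (pvEveryOther (xs.drop 1)) := by
  simpa using pvSlice_two xs 1

theorem pvB_eq_F (vs : List Int) : checking_order_alt vs = pvF vs := by
  simp only [checking_order_alt, PySem.List.slice_from_one, pvSlice_two0, pvSlice_two1,
    Option.getD_some, pvF, pvPairs]

-- ===== VERDICT (by name: the statement is the Claim_ definition above) =====
theorem checking_order_spec : Claim_equal_checking_order := by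
  intro values _
  unfold Spec_checking_order
  rw [pvA_eq_F, pvB_eq_F]
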